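-- pv_equiv track=rewrite | github.com/mindalyze-com/mtl-explorer | docker/garmin_fit_export/garmin_fit_to_gpx_export.py | rewrite_root_minimal
-- ===== SOURCE A (Python) =====
-- def rewrite_root_minimal(xml_text: str, use_gpxtpx: bool, use_gpxx: bool, use_gpxpx: bool) -> str:
--     """
--     Replace the <gpx ...> start tag with a minimal, standards-based header:
--       - default GPX 1.1 namespace + xsi
--       - only Garmin namespaces actually used (gpxtpx, gpxx, gpxpx)
--       - matching xsi:schemaLocation pairs
--     """
--     start = xml_text.find("<gpx")
--     if start == -1:
--         return xml_text
--     end = xml_text.find(">", start)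
--     if end == -1:
--         return xml_text
--
--     ns_pairs = [
--         ("http://www.topografix.com/GPX/1/1", "http://www.topografix.com/GPX/1/1/gpx.xsd")
--     ]
--     attrs = [
--         'xmlns="http://www.topografix.com/GPX/1/1"',
--         'xmlns:xsi="http://www.w3.org/2001/XMLSchema-instance"',
--     ]
--
--     if use_gpxtpx:
--         attrs.append('xmlns:gpxtpx="http://www.garmin.com/xmlschemas/TrackPointExtension/v1"')
--         ns_pairs.append((
--             "http://www.garmin.com/xmlschemas/TrackPointExtension/v1",
--             "http://www.garmin.com/xmlschemas/TrackPointExtensionv1.xsd",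
--         ))
--     if use_gpxx:
--         attrs.append('xmlns:gpxx="http://www.garmin.com/xmlschemas/GpxExtensions/v3"')
--         ns_pairs.append((
--             "http://www.garmin.com/xmlschemas/GpxExtensions/v3",
--             "http://www8.garmin.com/xmlschemas/GpxExtensionsv3.xsd",
--         ))
--     if use_gpxpx:
--         attrs.append('xmlns:gpxpx="http://www.garmin.com/xmlschemas/PowerExtension/v1"')
--         ns_pairs.append((
--             "http://www.garmin.com/xmlschemas/PowerExtension/v1",
--             "http://www.garmin.com/xmlschemas/PowerExtensionv1.xsd",
--         ))
--
--     schema_location = " ".join(" ".join(pair) for pair in ns_pairs)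
--     attrs.append('version="1.1"')
--     attrs.append('creator="garmin_fit_to_gpx_export"')
--     attrs.append(f'xsi:schemaLocation="{schema_location}"')
--
--     new_root = "<gpx " + " ".join(attrs) + ">"
--     return xml_text[:start] + new_root + xml_text[end+1:]
-- ===== SOURCE B (Python) =====
-- # Precomputed lookup table: the new root tag depends only on the three flags,
-- # so all 8 possible headers are built once at import time.
-- _HEADERS = {
--     (False, False, False): '<gpx xmlns="http://www.topografix.com/GPX/1/1" xmlns:xsi="http://www.w3.org/2001/XMLSchema-instance" version="1.1" creator="garmin_fit_to_gpx_export" xsi:schemaLocation="http://www.topografix.com/GPX/1/1 http://www.topografix.com/GPX/1/1/gpx.xsd">',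
--     (False, False, True): '<gpx xmlns="http://www.topografix.com/GPX/1/1" xmlns:xsi="http://www.w3.org/2001/XMLSchema-instance" xmlns:gpxpx="http://www.garmin.com/xmlschemas/PowerExtension/v1" version="1.1" creator="garmin_fit_to_gpx_export" xsi:schemaLocation="http://www.topografix.com/GPX/1/1 http://www.topografix.com/GPX/1/1/gpx.xsd http://www.garmin.com/xmlschemas/PowerExtension/v1 http://www.garmin.com/xmlschemas/PowerExtensionv1.xsd">',
--     (False, True, False): '<gpx xmlns="http://www.topografix.com/GPX/1/1" xmlns:xsi="http://www.w3.org/2001/XMLSchema-instance" xmlns:gpxx="http://www.garmin.com/xmlschemas/GpxExtensions/v3" version="1.1" creator="garmin_fit_to_gpx_export" xsi:schemaLocation="http://www.topografix.com/GPX/1/1 http://www.topografix.com/GPX/1/1/gpx.xsd http://www.garmin.com/xmlschemas/GpxExtensions/v3 http://www8.garmin.com/xmlschemas/GpxExtensionsv3.xsd">',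
--     (False, True, True): '<gpx xmlns="http://www.topografix.com/GPX/1/1" xmlns:xsi="http://www.w3.org/2001/XMLSchema-instance" xmlns:gpxx="http://www.garmin.com/xmlschemas/GpxExtensions/v3" xmlns:gpxpx="http://www.garmin.com/xmlschemas/PowerExtension/v1" version="1.1" creator="garmin_fit_to_gpx_export" xsi:schemaLocation="http://www.topografix.com/GPX/1/1 http://www.topografix.com/GPX/1/1/gpx.xsd http://www.garmin.com/xmlschemas/GpxExtensions/v3 http://www8.garmin.com/xmlschemas/GpxExtensionsv3.xsd http://www.garmin.com/xmlschemas/PowerExtension/v1 http://www.garmin.com/xmlschemas/PowerExtensionv1.xsd">',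
--     (True, False, False): '<gpx xmlns="http://www.topografix.com/GPX/1/1" xmlns:xsi="http://www.w3.org/2001/XMLSchema-instance" xmlns:gpxtpx="http://www.garmin.com/xmlschemas/TrackPointExtension/v1" version="1.1" creator="garmin_fit_to_gpx_export" xsi:schemaLocation="http://www.topografix.com/GPX/1/1 http://www.topografix.com/GPX/1/1/gpx.xsd http://www.garmin.com/xmlschemas/TrackPointExtension/v1 http://www.garmin.com/xmlschemas/TrackPointExtensionv1.xsd">',
--     (True, False, True): '<gpx xmlns="http://www.topografix.com/GPX/1/1" xmlns:xsi="http://www.w3.org/2001/XMLSchema-instance" xmlns:gpxtpx="http://www.garmin.com/xmlschemas/TrackPointExtension/v1" xmlns:gpxpx="http://www.garmin.com/xmlschemas/PowerExtension/v1" version="1.1" creator="garmin_fit_to_gpx_export" xsi:schemaLocation="http://www.topografix.com/GPX/1/1 http://www.topografix.com/GPX/1/1/gpx.xsd http://www.garmin.com/xmlschemas/TrackPointExtension/v1 http://www.garmin.com/xmlschemas/TrackPointExtensionv1.xsd http://www.garmin.com/xmlschemas/PowerExtension/v1 http://www.garmin.com/xmlschemas/PowerExtensionv1.xsd">',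
--     (True, True, False): '<gpx xmlns="http://www.topografix.com/GPX/1/1" xmlns:xsi="http://www.w3.org/2001/XMLSchema-instance" xmlns:gpxtpx="http://www.garmin.com/xmlschemas/TrackPointExtension/v1" xmlns:gpxx="http://www.garmin.com/xmlschemas/GpxExtensions/v3" version="1.1" creator="garmin_fit_to_gpx_export" xsi:schemaLocation="http://www.topografix.com/GPX/1/1 http://www.topografix.com/GPX/1/1/gpx.xsd http://www.garmin.com/xmlschemas/TrackPointExtension/v1 http://www.garmin.com/xmlschemas/TrackPointExtensionv1.xsd http://www.garmin.com/xmlschemas/GpxExtensions/v3 http://www8.garmin.com/xmlschemas/GpxExtensionsv3.xsd">',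
--     (True, True, True): '<gpx xmlns="http://www.topografix.com/GPX/1/1" xmlns:xsi="http://www.w3.org/2001/XMLSchema-instance" xmlns:gpxtpx="http://www.garmin.com/xmlschemas/TrackPointExtension/v1" xmlns:gpxx="http://www.garmin.com/xmlschemas/GpxExtensions/v3" xmlns:gpxpx="http://www.garmin.com/xmlschemas/PowerExtension/v1" version="1.1" creator="garmin_fit_to_gpx_export" xsi:schemaLocation="http://www.topografix.com/GPX/1/1 http://www.topografix.com/GPX/1/1/gpx.xsd http://www.garmin.com/xmlschemas/TrackPointExtension/v1 http://www.garmin.com/xmlschemas/TrackPointExtensionv1.xsd http://www.garmin.com/xmlschemas/GpxExtensions/v3 http://www8.garmin.com/xmlschemas/GpxExtensionsv3.xsd http://www.garmin.com/xmlschemas/PowerExtension/v1 http://www.garmin.com/xmlschemas/PowerExtensionv1.xsd">',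
-- }
--
--
-- def rewrite_root_minimal(xml_text: str, use_gpxtpx: bool, use_gpxx: bool, use_gpxpx: bool) -> str:
--     start = xml_text.find("<gpx")
--     if start == -1:
--         return xml_text
--     end = xml_text.find(">", start)
--     if end == -1:
--         return xml_text
--     return xml_text[:start] + _HEADERS[(use_gpxtpx, use_gpxx, use_gpxpx)] + xml_text[end + 1:]
-- ===== Notes on version B (the rewrite author's own statement) =====
-- stated objective: alternative
-- what changed: B replaces A's per-call list assembly and string joins with a precomputed module-level lookup table of all 8 possible root headers (the header depends only on the three flags), so the function is just find + table lookup + splice.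
import Mathlib
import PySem

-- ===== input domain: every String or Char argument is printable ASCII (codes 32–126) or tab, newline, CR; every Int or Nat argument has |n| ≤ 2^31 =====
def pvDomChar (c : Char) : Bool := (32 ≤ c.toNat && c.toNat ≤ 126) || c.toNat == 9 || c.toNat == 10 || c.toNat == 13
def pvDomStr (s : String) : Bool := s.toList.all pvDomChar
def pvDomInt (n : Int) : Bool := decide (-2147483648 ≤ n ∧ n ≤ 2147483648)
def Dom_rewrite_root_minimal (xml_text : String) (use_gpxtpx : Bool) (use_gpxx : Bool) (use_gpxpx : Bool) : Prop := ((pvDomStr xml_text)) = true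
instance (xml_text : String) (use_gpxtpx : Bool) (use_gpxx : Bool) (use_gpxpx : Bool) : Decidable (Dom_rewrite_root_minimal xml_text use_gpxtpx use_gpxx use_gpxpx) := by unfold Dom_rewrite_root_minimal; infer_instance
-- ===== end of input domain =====

-- B replaces A's per-call list assembly and joins with a precomputed 8-entry lookup table of complete root headers keyed by the three flags (different algorithm; return value proved equal).


-- ===== PORT A =====
-- Port of A: two lists (attrs, ns_pairs) extended by three independent if-blocks, then joined.
def rewrite_root_minimal (xml_text : String) (use_gpxtpx : Bool) (use_gpxx : Bool) (use_gpxpx : Bool) : String :=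
  let start := PySem.Str.find xml_text "<gpx"
  if start = -1 then xml_text else
  let end_ := PySem.Str.findFrom xml_text ">" start
  if end_ = -1 then xml_text else
  let ns_pairs : List (String × String) :=
    [("http://www.topografix.com/GPX/1/1", "http://www.topografix.com/GPX/1/1/gpx.xsd")]
  let attrs : List String :=
    ["xmlns=\"http://www.topografix.com/GPX/1/1\"",
     "xmlns:xsi=\"http://www.w3.org/2001/XMLSchema-instance\""]
  let attrs := if use_gpxtpx then attrs ++ ["xmlns:gpxtpx=\"http://www.garmin.com/xmlschemas/TrackPointExtension/v1\""] else attrs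
  let ns_pairs := if use_gpxtpx then ns_pairs ++ [("http://www.garmin.com/xmlschemas/TrackPointExtension/v1", "http://www.garmin.com/xmlschemas/TrackPointExtensionv1.xsd")] else ns_pairs
  let attrs := if use_gpxx then attrs ++ ["xmlns:gpxx=\"http://www.garmin.com/xmlschemas/GpxExtensions/v3\""] else attrs
  let ns_pairs := if use_gpxx then ns_pairs ++ [("http://www.garmin.com/xmlschemas/GpxExtensions/v3", "http://www8.garmin.com/xmlschemas/GpxExtensionsv3.xsd")] else ns_pairs
  let attrs := if use_gpxpx then attrs ++ ["xmlns:gpxpx=\"http://www.garmin.com/xmlschemas/PowerExtension/v1\""] else attrs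
  let ns_pairs := if use_gpxpx then ns_pairs ++ [("http://www.garmin.com/xmlschemas/PowerExtension/v1", "http://www.garmin.com/xmlschemas/PowerExtensionv1.xsd")] else ns_pairs
  let schema_location := PySem.Str.join " " (ns_pairs.map (fun p => PySem.Str.join " " [p.1, p.2]))
  let attrs := attrs ++ ["version=\"1.1\"", "creator=\"garmin_fit_to_gpx_export\"",
                         "xsi:schemaLocation=\"" ++ schema_location ++ "\""]
  let new_root := "<gpx " ++ PySem.Str.join " " attrs ++ ">"
  PySem.Str.slice xml_text none (some start) ++ new_root ++ PySem.Str.slice xml_text (some (end_ + 1)) none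

-- ===== PORT B =====
-- Port of B: the 8-entry precomputed header table (B's module-level _HEADERS dict, keyed by the three flags).
def pvHeaders (use_gpxtpx : Bool) (use_gpxx : Bool) (use_gpxpx : Bool) : String :=
  match use_gpxtpx, use_gpxx, use_gpxpx with
  | false, false, false => "<gpx xmlns=\"http://www.topografix.com/GPX/1/1\" xmlns:xsi=\"http://www.w3.org/2001/XMLSchema-instance\" version=\"1.1\" creator=\"garmin_fit_to_gpx_export\" xsi:schemaLocation=\"http://www.topografix.com/GPX/1/1 http://www.topografix.com/GPX/1/1/gpx.xsd\">"
  | false, false, true => "<gpx xmlns=\"http://www.topografix.com/GPX/1/1\" xmlns:xsi=\"http://www.w3.org/2001/XMLSchema-instance\" xmlns:gpxpx=\"http://www.garmin.com/xmlschemas/PowerExtension/v1\" version=\"1.1\" creator=\"garmin_fit_to_gpx_export\" xsi:schemaLocation=\"http://www.topografix.com/GPX/1/1 http://www.topografix.com/GPX/1/1/gpx.xsd http://www.garmin.com/xmlschemas/PowerExtension/v1 http://www.garmin.com/xmlschemas/PowerExtensionv1.xsd\">"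
  | false, true, false => "<gpx xmlns=\"http://www.topografix.com/GPX/1/1\" xmlns:xsi=\"http://www.w3.org/2001/XMLSchema-instance\" xmlns:gpxx=\"http://www.garmin.com/xmlschemas/GpxExtensions/v3\" version=\"1.1\" creator=\"garmin_fit_to_gpx_export\" xsi:schemaLocation=\"http://www.topografix.com/GPX/1/1 http://www.topografix.com/GPX/1/1/gpx.xsd http://www.garmin.com/xmlschemas/GpxExtensions/v3 http://www8.garmin.com/xmlschemas/GpxExtensionsv3.xsd\">"
  | false, true, true => "<gpx xmlns=\"http://www.topografix.com/GPX/1/1\" xmlns:xsi=\"http://www.w3.org/2001/XMLSchema-instance\" xmlns:gpxx=\"http://www.garmin.com/xmlschemas/GpxExtensions/v3\" xmlns:gpxpx=\"http://www.garmin.com/xmlschemas/PowerExtension/v1\" version=\"1.1\" creator=\"garmin_fit_to_gpx_export\" xsi:schemaLocation=\"http://www.topografix.com/GPX/1/1 http://www.topografix.com/GPX/1/1/gpx.xsd http://www.garmin.com/xmlschemas/GpxExtensions/v3 http://www8.garmin.com/xmlschemas/GpxExtensionsv3.xsd http://www.garmin.com/xmlschemas/PowerExtension/v1 http://www.garmi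n.com/xmlschemas/PowerExtensionv1.xsd\">"
  | true, false, false => "<gpx xmlns=\"http://www.topografix.com/GPX/1/1\" xmlns:xsi=\"http://www.w3.org/2001/XMLSchema-instance\" xmlns:gpxtpx=\"http://www.garmin.com/xmlschemas/TrackPointExtension/v1\" version=\"1.1\" creator=\"garmin_fit_to_gpx_export\" xsi:schemaLocation=\"http://www.topografix.com/GPX/1/1 http://www.topografix.com/GPX/1/1/gpx.xsd http://www.garmin.com/xmlschemas/TrackPointExtension/v1 http://www.garmin.com/xmlschemas/TrackPointExtensionv1.xsd\">"
  | true, false, true => "<gpx xmlns=\"http://www.topografix.com/GPX/1/1\" xmlns:xsi=\"http://www.w3.org/2001/XMLSchema-instance\" xmlns:gpxtpx=\"http://www.garmin.com/xmlschemas/TrackPointExtension/v1\" xmlns:gpxpx=\"http://www.garmin.com/xmlschemas/PowerExtension/v1\" version=\"1.1\" creator=\"garmin_fit_to_gpx_export\" xsi:schemaLocation=\"http://www.topografix.com/GPX/1/1 http://www.topografix.com/GPX/1/1/gpx.xsd http://www.garmin.com/xmlschemas/TrackPointExtension/v1 http://www.garmin.com/xmlschemas/TrackPointExtensionv1.xsd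 http://www.garmin.com/xmlschemas/PowerExtension/v1 http://www.garmin.com/xmlschemas/PowerExtensionv1.xsd\">"
  | true, true, false => "<gpx xmlns=\"http://www.topografix.com/GPX/1/1\" xmlns:xsi=\"http://www.w3.org/2001/XMLSchema-instance\" xmlns:gpxtpx=\"http://www.garmin.com/xmlschemas/TrackPointExtension/v1\" xmlns:gpxx=\"http://www.garmin.com/xmlschemas/GpxExtensions/v3\" version=\"1.1\" creator=\"garmin_fit_to_gpx_export\" xsi:schemaLocation=\"http://www.topografix.com/GPX/1/1 http://www.topografix.com/GPX/1/1/gpx.xsd http://www.garmin.com/xmlschemas/TrackPointExtension/v1 http://www.garmin.com/xmlschemas/TrackPointExtensionv1.xsd http://www.garmin.com/xmlschemas/GpxExtensions/v3 http://www8.garmin.com/xmlschemas/GpxExtensionsv3.xsd\">"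
  | true, true, true => "<gpx xmlns=\"http://www.topografix.com/GPX/1/1\" xmlns:xsi=\"http://www.w3.org/2001/XMLSchema-instance\" xmlns:gpxtpx=\"http://www.garmin.com/xmlschemas/TrackPointExtension/v1\" xmlns:gpxx=\"http://www.garmin.com/xmlschemas/GpxExtensions/v3\" xmlns:gpxpx=\"http://www.garmin.com/xmlschemas/PowerExtension/v1\" version=\"1.1\" creator=\"garmin_fit_to_gpx_export\" xsi:schemaLocation=\"http://www.topografix.com/GPX/1/1 http://www.topografix.com/GPX/1/1/gpx.xsd http://www.garmin.com/xmlschemas/TrackPointExtension/v1 http://www.garmin.com/xmlschemas/TrackPointExtensionv1.xsd http://www.garmin.com/xmlschemas/GpxExtensions/v3 http://www8.garmin.com/xmlschemas/GpxExtensionsv3.xsd http://www.garmin.com/xmlschemas/PowerExtension/v1 http://www.garmin.com/xmlschemas/PowerExtensionv1.xsd\">"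

def rewrite_root_minimal_alt (xml_text : String) (use_gpxtpx : Bool) (use_gpxx : Bool) (use_gpxpx : Bool) : String :=
  let start := PySem.Str.find xml_text "<gpx"
  if start = -1 then xml_text else
  let end_ := PySem.Str.findFrom xml_text ">" start
  if end_ = -1 then xml_text else
  PySem.Str.slice xml_text none (some start) ++ pvHeaders use_gpxtpx use_gpxx use_gpxpx ++
    PySem.Str.slice xml_text (some (end_ + 1)) none

-- ===== PRECONDITION & SPEC =====
def Spec_rewrite_root_minimal (xml_text : String) (use_gpxtpx : Bool) (use_gpxx : Bool) (use_gpxpx : Bool) (out : String) : Prop := out = rewrite_root_minimal_alt xml_text use_gpxtpx use_gpxx use_gpxpx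
instance (xml_text : String) (use_gpxtpx : Bool) (use_gpxx : Bool) (use_gpxpx : Bool) (out : String) : Decidable (Spec_rewrite_root_minimal xml_text use_gpxtpx use_gpxx use_gpxpx out) := by unfold Spec_rewrite_root_minimal; infer_instance

-- ===== CLAIM (what is proved, stated in full; the proofs are below) =====
def Claim_equal_rewrite_root_minimal : Prop := ∀ (xml_text : String) (use_gpxtpx : Bool) (use_gpxx : Bool) (use_gpxpx : Bool), Dom_rewrite_root_minimal xml_text use_gpxtpx use_gpxx use_gpxpx → Spec_rewrite_root_minimal xml_text use_gpxtpx use_gpxx use_gpxpx (rewrite_root_minimal xml_text use_gpxtpx use_gpxx use_gpxpx)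

-- ===== LEMMAS AND PROOFS =====

-- proof-only: PySem.Str.join unfolded to plain appends, so literal strings fold by simp
theorem pvJoin_singleton (sep a : String) : PySem.Str.join sep [a] = a := by
  apply String.toList_injective
  simp [PySem.Str.toList_join, PySem.Chars.join_singleton]

theorem pvJoin_cons_cons (sep a b : String) (l : List String) :
    PySem.Str.join sep (a :: b :: l) = a ++ sep ++ PySem.Str.join sep (b :: l) := by
  apply String.toList_injective
  simp [PySem.Str.toList_join, PySem.Chars.join_cons_cons]

-- ===== VERDICT (by name: the statement is the Claim_ definition above) =====
set_option maxRecDepth 4096 in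
set_option maxHeartbeats 1600000 in
theorem rewrite_root_minimal_spec : Claim_equal_rewrite_root_minimal := by
  intro xml_text t x p _
  unfold Spec_rewrite_root_minimal
  cases t <;> cases x <;> cases p <;>
    (simp only [rewrite_root_minimal, rewrite_root_minimal_alt]
     split_ifs <;>
       first
       | contradiction
       | simp [pvHeaders, pvJoin_cons_cons, pvJoin_singleton])
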